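-- pv_equiv track=rewrite | github.com/kbreivik/ai-local-agent-tools | mcp_server/tools/render_tools.py | _pick_columns
-- ===== SOURCE A (Python) =====
-- _PREFERRED_FRAGMENTS = (
--     "name", "hostname", "label", "id",
--     "ip", "address", "mac",
--     "status", "state", "health",
--     "signal", "rssi", "up", "uptime",
--     "service", "container", "node", "host",
--     "port", "type", "kind",
--     "ap", "switch", "location",
--     "version", "image",
-- )
--
-- _SKIP_FRAGMENTS = (
--     "raw", "json", "metadata_json", "config", "description",
--     "notes", "comments", "full", "body", "source",
-- )
--
-- def _score_column(col: str) -> int: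
--     """Higher score = more likely to be useful in a table."""
--     lc = col.lower()
--     for bad in _SKIP_FRAGMENTS:
--         if bad in lc:
--             return -1
--     for i, frag in enumerate(_PREFERRED_FRAGMENTS):
--         if frag in lc:
--             return 1000 - i  # earlier fragments score higher
--     return 0  # unknown columns get mid-priority
--
-- def _pick_columns(available: list[str], max_cols: int = 6) -> list[str]:
--     """Pick up to max_cols columns using the preferred-fragments heuristic."""
--     if not available:
--         return []
--     scored = [(c, _score_column(c)) for c in available]
--     scored = [(c, s) for c, s in scored if s >= 0]
--     scored.sort(key=lambda t: (-t[1], t[0]))  # score desc, then name asc for stability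
--     picked = [c for c, _ in scored[:max_cols]]
--     if not picked:
--         # Nothing matched preferences and nothing was skipped — fall back to
--         # first N available columns preserving order.
--         picked = available[:max_cols]
--     return picked
-- ===== SOURCE B (Python) =====
-- _PREFERRED_FRAGMENTS = (
--     "name", "hostname", "label", "id",
--     "ip", "address", "mac",
--     "status", "state", "health",
--     "signal", "rssi", "up", "uptime",
--     "service", "container", "node", "host",
--     "port", "type", "kind",
--     "ap", "switch", "location",
--     "version", "image",
-- )
--
-- _SKIP_FRAGMENTS = (
--     "raw", "json", "metadata_json", "config", "description",
--     "notes", "comments", "full", "body", "source",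
-- )
--
-- def _score_column(col: str) -> int:
--     """Higher score = more likely to be useful in a table."""
--     lc = col.lower()
--     for bad in _SKIP_FRAGMENTS:
--         if bad in lc:
--             return -1
--     for i, frag in enumerate(_PREFERRED_FRAGMENTS):
--         if frag in lc:
--             return 1000 - i
--     return 0
--
-- # Every non-negative score is one of these values, best first.
-- _SCORE_VALUES = [1000 - i for i in range(len(_PREFERRED_FRAGMENTS))] + [0]
--
-- def _pick_columns(available: list[str], max_cols: int = 6) -> list[str]:
--     """Bucket columns by the finitely many possible scores, best score first."""
--     if not available:
--         return []
--     scores = [_score_column(c) for c in available]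
--     picked = []
--     for s in _SCORE_VALUES:
--         picked += sorted(c for c, sc in zip(available, scores) if sc == s)
--     picked = picked[:max_cols]
--     if not picked:
--         picked = available[:max_cols]
--     return picked
-- ===== Notes on version B (the rewrite author's own statement) =====
-- stated objective: alternative
-- what changed: B drops the (column, score) pair filter-and-global-sort by the composite key (-score, name): it scores each column once, then buckets the columns over the 27 possible score values in best-first order, sorting each bucket by name only, and concatenates and slices.
import Mathlib
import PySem

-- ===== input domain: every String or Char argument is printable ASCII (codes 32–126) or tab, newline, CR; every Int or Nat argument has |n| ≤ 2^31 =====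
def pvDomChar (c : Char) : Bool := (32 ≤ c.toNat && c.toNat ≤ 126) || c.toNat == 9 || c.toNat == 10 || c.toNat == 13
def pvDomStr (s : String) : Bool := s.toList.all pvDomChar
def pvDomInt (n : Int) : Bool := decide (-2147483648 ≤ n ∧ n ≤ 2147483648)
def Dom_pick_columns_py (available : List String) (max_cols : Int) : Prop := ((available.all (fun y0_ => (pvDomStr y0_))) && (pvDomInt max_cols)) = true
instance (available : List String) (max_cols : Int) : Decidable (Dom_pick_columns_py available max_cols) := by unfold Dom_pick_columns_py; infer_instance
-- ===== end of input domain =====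

-- B replaces A's global sort of (column, score) pairs by bucketing the columns over the
-- finitely many possible score values, best score first, with a per-bucket name sort
-- (objective: alternative; _score_column is shared by both versions verbatim).

-- ===== PORT A =====
def prefFrags : List String :=
  ["name", "hostname", "label", "id",
   "ip", "address", "mac",
   "status", "state", "health",
   "signal", "rssi", "up", "uptime",
   "service", "container", "node", "host",
   "port", "type", "kind",
   "ap", "switch", "location",
   "version", "image"]

def skipFrags : List String :=
  ["raw", "json", "metadata_json", "config", "description",
   "notes", "comments", "full", "body", "source"]

-- the 'for i, frag in enumerate(...): if frag in lc: return 1000 - i' loop, then 'return 0'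
def scorePref (lc : String) : List String → Int → Int
  | [], _ => 0
  | f :: rest, i => if PySem.Str.isIn f lc then 1000 - i else scorePref lc rest (i + 1)

-- _score_column (the 'for bad in _SKIP_FRAGMENTS: if bad in lc: return -1' loop is .any)
def score_column (col : String) : Int :=
  let lc := PySem.Str.lower col
  if skipFrags.any (fun bad => PySem.Str.isIn bad lc) then -1
  else scorePref lc prefFrags 0

def pick_columns_py (available : List String) (max_cols : Int) : List String :=
  if available = [] then []
  else
    let scored := available.map (fun c => (c, score_column c))
    let scored2 := scored.filter (fun t => decide ((0:Int) ≤ t.2))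
    let sortedPairs := PySem.List.sorted2 scored2 (fun t => -t.2) (fun t => t.1)
    let picked := (PySem.List.slice sortedPairs none (some max_cols)).map (fun t => t.1)
    if picked = [] then PySem.List.slice available none (some max_cols) else picked

-- ===== PORT B =====
-- _SCORE_VALUES = [1000 - i for i in range(len(_PREFERRED_FRAGMENTS))] + [0]
def scoreValues : List Int := (List.range prefFrags.length).map (fun i => 1000 - (i : Int)) ++ [0]

def pick_columns_py_alt (available : List String) (max_cols : Int) : List String :=
  if available = [] then []
  else
    let scores := available.map (fun c => score_column c)
    let picked := scoreValues.foldl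
      (fun acc s => acc ++ PySem.List.sorted
        (((available.zip scores).filter (fun p => decide (p.2 = s))).map (fun p => p.1)) (fun x => x)) []
    let picked2 := PySem.List.slice picked none (some max_cols)
    if picked2 = [] then PySem.List.slice available none (some max_cols) else picked2

-- ===== PRECONDITION & SPEC =====
def Spec_pick_columns_py (available : List String) (max_cols : Int) (out : List String) : Prop := out = pick_columns_py_alt available max_cols
instance (available : List String) (max_cols : Int) (out : List String) : Decidable (Spec_pick_columns_py available max_cols out) := by unfold Spec_pick_columns_py; infer_instance

-- ===== CLAIM (what is proved, stated in full; the proofs are below) =====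
def Claim_equal_pick_columns_py : Prop := ∀ (available : List String) (max_cols : Int), Dom_pick_columns_py available max_cols → Spec_pick_columns_py available max_cols (pick_columns_py available max_cols)

-- ===== LEMMAS AND PROOFS =====

-- B's bucket for one score value
def bucket (available : List String) (s : Int) : List String :=
  PySem.List.sorted (available.filter (fun c => decide (score_column c = s))) (fun x => x)

lemma zip_scores_bucket (xs : List String) (s : Int) :
    ((xs.zip (xs.map (fun c => score_column c))).filter (fun p => decide (p.2 = s))).map (fun p => p.1)
      = xs.filter (fun c => decide (score_column c = s)) := by
  induction xs with
  | nil => rfl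
  | cons x xs ih =>
    by_cases h : score_column x = s <;>
      simp [h, ih]

lemma sorted2_lex (xs : List (String × Int)) :
    PySem.List.sorted2 xs (fun t => -t.2) (fun t => t.1)
      = PySem.List.sorted xs (fun t => toLex (-t.2, t.1)) := by
  show xs.foldl (fun acc x => PySem.List.insertBy
      (fun a b => decide (-a.2 < -b.2) || (!decide (-b.2 < -a.2) && decide (a.1 < b.1))) x acc) []
    = xs.foldl (fun acc x => PySem.List.insertBy
      (fun a b => decide ((toLex (-a.2, a.1) : Lex (Int × String)) < toLex (-b.2, b.1))) x acc) []
  have hfun : (fun (a b : String × Int) => decide (-a.2 < -b.2) || (!decide (-b.2 < -a.2) && decide (a.1 < b.1)))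
      = fun a b => decide ((toLex (-a.2, a.1) : Lex (Int × String)) < toLex (-b.2, b.1)) := by
    funext a b
    by_cases h1 : -a.2 < -b.2 <;> by_cases h2 : -b.2 < -a.2 <;> by_cases h3 : a.1 < b.1 <;>
      simp [h1, h2, h3, Prod.Lex.lt_iff] <;> omega
  rw [hfun]

lemma scorePref_cases (lc : String) (fr : List String) (i : Int) :
    scorePref lc fr i = 0 ∨ ∃ j : Nat, j < fr.length ∧ scorePref lc fr i = 1000 - (i + j) := by
  induction fr generalizing i with
  | nil => exact Or.inl rfl
  | cons f rest ih =>
    have hdef : scorePref lc (f :: rest) i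
        = if PySem.Str.isIn f lc then 1000 - i else scorePref lc rest (i + 1) := rfl
    by_cases h : PySem.Str.isIn f lc
    · refine Or.inr ⟨0, by simp, ?_⟩
      rw [hdef, if_pos h]; push_cast; ring
    · rw [hdef, if_neg h]
      rcases ih (i + 1) with h0 | ⟨j, hj, he⟩
      · exact Or.inl h0
      · refine Or.inr ⟨j + 1, by simpa using Nat.succ_lt_succ hj, ?_⟩
        rw [he]; push_cast; ring

lemma mem_scoreValues_iff (c : String) :
    score_column c ∈ scoreValues ↔ 0 ≤ score_column c := by
  have hdef : score_column c = if skipFrags.any (fun bad => PySem.Str.isIn bad (PySem.Str.lower c))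
      then -1 else scorePref (PySem.Str.lower c) prefFrags 0 := rfl
  by_cases hskip : skipFrags.any (fun bad => PySem.Str.isIn bad (PySem.Str.lower c))
  · have h : score_column c = -1 := by rw [hdef, if_pos hskip]
    rw [h]; decide
  · have h : score_column c = scorePref (PySem.Str.lower c) prefFrags 0 := by
      rw [hdef, if_neg hskip]
    rcases scorePref_cases (PySem.Str.lower c) prefFrags 0 with h0 | ⟨j, hj, he⟩
    · rw [h, h0]; decide
    · rw [h, he]
      have hlen : prefFrags.length = 26 := rfl
      rw [hlen] at hj
      constructor
      · intro _; omega
      · intro _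
        have hmem : ∀ k : Nat, k < 26 → ((1000 - (k:Int)) ∈ scoreValues) := by decide
        rw [show (1000 - ((0:Int) + j)) = 1000 - (j:Int) by ring]
        exact hmem j hj

lemma perm_filter_or {α : Type} (p q : α → Bool) (xs : List α) (hd : ∀ x, ¬(p x = true ∧ q x = true)) :
    (xs.filter p ++ xs.filter q).Perm (xs.filter (fun x => p x || q x)) := by
  induction xs with
  | nil => simp
  | cons x xs ih =>
    by_cases hp : p x
    · have hq : q x = false := by
        cases hqq : q x
        · rfl
        · exact absurd ⟨hp, hqq⟩ (hd x)
      simpa [hp, hq] using ih.cons x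
    · by_cases hq : q x
      · simp only [List.filter_cons, hp, hq, Bool.false_or, if_true]
        exact List.perm_middle.trans (ih.cons x)
      · simpa [hp, hq] using ih

lemma flatMap_filter_perm (xs : List String) (vs : List Int) (hnd : vs.Nodup) :
    (vs.flatMap (fun s => xs.filter (fun c => decide (score_column c = s)))).Perm
      (xs.filter (fun c => decide (score_column c ∈ vs))) := by
  induction vs with
  | nil => simp
  | cons v vs ih =>
    rcases List.nodup_cons.mp hnd with ⟨hv, hnd'⟩
    have h1 : (xs.filter (fun c => decide (score_column c = v))
        ++ vs.flatMap (fun s => xs.filter (fun c => decide (score_column c = s)))).Perm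
        (xs.filter (fun c => decide (score_column c = v))
          ++ xs.filter (fun c => decide (score_column c ∈ vs))) :=
      (ih hnd').append_left _
    have h2 := perm_filter_or (fun c => decide (score_column c = v))
      (fun c => decide (score_column c ∈ vs)) xs
      (by
        intro x hx
        rcases hx with ⟨h1', h2'⟩
        simp only [decide_eq_true_eq] at h1' h2'
        exact hv (h1' ▸ h2'))
    have h3 : xs.filter (fun c => decide (score_column c = v) || decide (score_column c ∈ vs))
        = xs.filter (fun c => decide (score_column c ∈ v :: vs)) := by
      apply List.filter_congr
      intro x _
      simp [List.mem_cons]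
    rw [List.flatMap_cons]
    exact h1.trans (h3 ▸ h2)

lemma flatMap_buckets_perm (available : List String) :
    (scoreValues.flatMap (fun s => bucket available s)).Perm
      (available.filter (fun c => decide (0 ≤ score_column c))) := by
  have h1 : (scoreValues.flatMap (fun s => bucket available s)).Perm
      (scoreValues.flatMap (fun s => available.filter (fun c => decide (score_column c = s)))) := by
    induction scoreValues with
    | nil => simp
    | cons v vs ih =>
      rw [List.flatMap_cons, List.flatMap_cons]
      exact (PySem.List.sorted_perm _ _ _).append ih
  have hnd : scoreValues.Nodup := by decide
  have h2 := flatMap_filter_perm available scoreValues hnd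
  have h3 : available.filter (fun c => decide (score_column c ∈ scoreValues))
      = available.filter (fun c => decide (0 ≤ score_column c)) := by
    apply List.filter_congr
    intro x _
    simp [mem_scoreValues_iff]
  exact h1.trans (h3 ▸ h2)

lemma mem_bucket_score {available : List String} {s : Int} {c : String}
    (h : c ∈ bucket available s) : score_column c = s := by
  rw [bucket, PySem.List.mem_sorted, List.mem_filter] at h
  exact of_decide_eq_true h.2

lemma sortedPairs_eq (available : List String) :
    PySem.List.sorted2
        ((available.map (fun c => (c, score_column c))).filter (fun t => decide ((0:Int) ≤ t.2)))
        (fun t => -t.2) (fun t => t.1)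
      = (scoreValues.flatMap (fun s => bucket available s)).map (fun c => (c, score_column c)) := by
  rw [sorted2_lex]
  refine List.Perm.eq_of_pairwise
    (le := fun t u => (toLex (-t.2, t.1) : Lex (Int × String)) ≤ toLex (-u.2, u.1)) ?_ ?_ ?_ ?_
  · intro a b _ _ hab hba
    have h := le_antisymm hab hba
    rw [toLex_inj, Prod.mk.injEq] at h
    exact Prod.ext h.2 (by have := h.1; omega)
  · exact PySem.List.sorted_pairwise _ _
  · rw [List.pairwise_map]
    dsimp only
    apply List.pairwise_flatMap.mpr
    refine ⟨?_, ?_⟩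
    · intro s _
      refine (PySem.List.sorted_pairwise _ (fun x => x)).imp_of_mem ?_
      intro a b ha hb hle
      have hsa := mem_bucket_score (s := s) ha
      have hsb := mem_bucket_score (s := s) hb
      rw [Prod.Lex.le_iff]
      simp only [ofLex_toLex]
      exact Or.inr ⟨by rw [hsa, hsb], hle⟩
    · have hgt : scoreValues.Pairwise (fun a b => b < a) := by decide
      refine hgt.imp ?_
      intro s t hst x hx y hy
      have hsx := mem_bucket_score hx
      have hsy := mem_bucket_score hy
      rw [Prod.Lex.le_iff]
      simp only [ofLex_toLex]
      exact Or.inl (by omega)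
  · have hfm : ((available.map (fun c => (c, score_column c))).filter (fun t => decide ((0:Int) ≤ t.2)))
        = (available.filter (fun c => decide (0 ≤ score_column c))).map (fun c => (c, score_column c)) :=
      List.filter_map
    refine (PySem.List.sorted_perm _ _ _).trans ?_
    rw [hfm]
    exact ((flatMap_buckets_perm available).map _).symm

lemma slice_map {α β : Type} (f : α → β) (xs : List α) (b : Int) :
    PySem.List.slice (xs.map f) none (some b) = (PySem.List.slice xs none (some b)).map f := by
  by_cases hb : 0 ≤ b
  · rw [PySem.List.slice_to _ hb, PySem.List.slice_to _ hb, List.map_take]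
  · have hk : b = -(((-b).toNat : Nat) : Int) := by omega
    have hpos : 0 < (-b).toNat := by omega
    rw [hk, PySem.List.slice_to_neg_natCast (xs.map f) _ hpos,
      PySem.List.slice_to_neg_natCast xs _ hpos, List.map_take, List.length_map]

-- ===== VERDICT (by name: the statement is the Claim_ definition above) =====
theorem pick_columns_py_spec : Claim_equal_pick_columns_py := by
  intro available max_cols _
  show _ = _
  unfold pick_columns_py pick_columns_py_alt
  by_cases h : available = []
  · simp [h]
  · simp only [h, if_false]
    rw [sortedPairs_eq]
    simp only [zip_scores_bucket]
    rw [show (scoreValues.foldl (fun acc s => acc ++ PySem.List.sorted (available.filter (fun c => decide (score_column c = s))) (fun x => x)) [])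
        = scoreValues.flatMap (fun s => bucket available s) by
      simpa [bucket] using PySem.List.foldl_append_eq_flatMap (g := fun s => bucket available s) (l := scoreValues) (acc := [])]
    rw [slice_map]
    have hmap : ∀ l : List String,
        (l.map (fun c => (c, score_column c))).map (fun t : String × Int => t.1) = l := by
      intro l
      rw [List.map_map]
      exact List.map_id l
    rw [hmap]
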